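-- pv_equiv track=rewrite | github.com/burcu1467/HamiltonianPaths | ring_analysis.py | get_zero_divisors
-- ===== SOURCE A (Python) =====
-- def get_zero_divisors(n):
--     """
--     Identify the set of zero-divisors in Z_n.
--     A zero-divisor is an element x such that there exists y != 0 with x*y ≡ 0 mod n.
--     Note: 0 is always included as a zero-divisor.
--     """
--     zero_divisors = set()
--     for x in range(n):
--         for y in range(1, n):
--             if (x * y) % n == 0:
--                 zero_divisors.add(x)
--                 break  # No need to check further y for this x
--     return zero_divisors
-- ===== SOURCE B (Python) =====
-- def get_zero_divisors(n):
--     def gcd(a, b):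
--         while b:
--             a, b = b, a % b
--         return a
--     return {x for x in range(n) if gcd(x, n) > 1}
-- ===== Notes on version B (the rewrite author's own statement) =====
-- stated objective: faster
-- what changed: Replaces the O(n^2) double loop searching for a witness y per x with a single Euclidean-gcd test per element, using the fact that x is a zero-divisor of Z_n iff gcd(x,n) > 1.
import Mathlib
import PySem

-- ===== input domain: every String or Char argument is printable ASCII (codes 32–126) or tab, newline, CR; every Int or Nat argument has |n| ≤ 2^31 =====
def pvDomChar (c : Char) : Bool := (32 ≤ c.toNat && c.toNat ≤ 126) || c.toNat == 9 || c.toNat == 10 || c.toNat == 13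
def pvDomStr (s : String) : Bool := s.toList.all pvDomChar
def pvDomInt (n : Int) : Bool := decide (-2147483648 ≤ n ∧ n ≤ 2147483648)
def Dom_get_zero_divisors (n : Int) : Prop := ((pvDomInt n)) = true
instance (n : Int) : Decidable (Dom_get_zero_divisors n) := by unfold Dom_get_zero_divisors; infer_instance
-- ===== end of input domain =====

-- B replaces A's O(n^2) double loop by one Euclidean-gcd test per element (x is a zero-divisor of Z_n iff gcd(x,n) > 1); objective: faster.

-- ===== PORT A =====
-- outer loop over range(n); inner loop with break = List.any over range(1, n)
def get_zero_divisors (n : Int) : List Int :=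
  (PySem.List.pyRange 0 n 1).foldl
    (fun s x =>
      if (PySem.List.pyRange 1 n 1).any (fun y => PySem.Int.mod (x * y) n == 0) then
        PySem.Set.add s x
      else s)
    PySem.Set.empty

-- ===== PORT B =====
-- Source B's hand-written Euclidean gcd loop, with Python's %
def pyGcd (a b : Int) : Int :=
  if hb : b = 0 then a else pyGcd b (PySem.Int.mod a b)
termination_by b.natAbs
decreasing_by
  rcases lt_or_gt_of_ne hb with h | h
  · have h1 := (PySem.Int.mod_neg_bounds a h).1
    have h2 := (PySem.Int.mod_neg_bounds a h).2
    omega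
  · have h1 := PySem.Int.mod_nonneg a h
    have h2 := PySem.Int.mod_lt a h
    omega

def get_zero_divisors_alt (n : Int) : List Int :=
  PySem.Set.ofList ((PySem.List.pyRange 0 n 1).filter (fun x => decide (pyGcd x n > 1)))

-- ===== PRECONDITION & SPEC =====
def Spec_get_zero_divisors (n : Int) (out : List Int) : Prop := out = get_zero_divisors_alt n
instance (n : Int) (out : List Int) : Decidable (Spec_get_zero_divisors n out) := by unfold Spec_get_zero_divisors; infer_instance

-- ===== CLAIM (what is proved, stated in full; the proofs are below) =====
def Claim_equal_get_zero_divisors : Prop := ∀ (n : Int), Dom_get_zero_divisors n → Spec_get_zero_divisors n (get_zero_divisors n)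

-- ===== LEMMAS AND PROOFS =====

-- conditional Set.add fold over a list of fresh, distinct elements is init ++ filter
theorem foldl_add_filter (p : Int → Bool) (l : List Int) (init : List Int)
    (h : ∀ x ∈ l, x ∉ init) (hn : l.Nodup) :
    l.foldl (fun s x => if p x then PySem.Set.add s x else s) init = init ++ l.filter p := by
  induction l generalizing init with
  | nil => simp
  | cons x t ih =>
    have hx : x ∉ init := h x (List.mem_cons_self ..)
    have hnt : t.Nodup := hn.of_cons
    by_cases hp : p x
    · have hadd : PySem.Set.add init x = init ++ [x] := by
        simp [PySem.Set.add, PySem.Set.contains, hx]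
      rw [List.foldl_cons]
      simp only [hp, if_pos]
      rw [hadd, ih (init ++ [x])
        (by
          intro y hy
          have hyx : y ≠ x := by
            rintro rfl
            exact (List.nodup_cons.mp hn).1 hy
          simp [h y (List.mem_cons_of_mem _ hy), hyx])
        hnt]
      simp [hp]
    · rw [List.foldl_cons]
      simp only [hp, if_neg, Bool.false_eq_true, not_false_iff, if_false]
      rw [ih init (fun y hy => h y (List.mem_cons_of_mem _ hy)) hnt]
      simp [hp]

theorem ofList_nodup (l : List Int) (hn : l.Nodup) : PySem.Set.ofList l = l := by
  rw [PySem.Set.ofList_eq_foldl]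
  have := foldl_add_filter (fun _ => true) l [] (by simp) hn
  simpa using this

theorem gcd_mod_step (a b : Int) (ha : 0 ≤ a) (hb : 0 < b) :
    Int.gcd b (a % b) = Int.gcd a b := by
  obtain ⟨A, rfl⟩ := Int.eq_ofNat_of_zero_le ha
  obtain ⟨B, rfl⟩ := Int.eq_ofNat_of_zero_le hb.le
  rw [show ((A : Int) % B) = ((A % B : Nat) : Int) by push_cast; ring]
  rw [Int.gcd_natCast_natCast, Int.gcd_natCast_natCast]
  rw [Nat.gcd_comm, ← Nat.gcd_rec, Nat.gcd_comm]

theorem pyGcd_eq_gcd (a b : Int) (ha : 0 ≤ a) (hb : 0 ≤ b) :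
    pyGcd a b = (Int.gcd a b : Int) := by
  rw [pyGcd]
  split
  · rename_i h
    subst h
    simp [Int.natAbs_of_nonneg ha]
  · rename_i h
    have hbpos : 0 < b := lt_of_le_of_ne hb (Ne.symm h)
    rw [PySem.Int.mod_eq_emod_of_pos hbpos]
    rw [pyGcd_eq_gcd b (a % b) hb (Int.emod_nonneg a (by omega))]
    rw [gcd_mod_step a b ha hbpos]
termination_by b.natAbs
decreasing_by
  have h2 := Int.emod_lt_of_pos a hbpos
  have h1 := Int.emod_nonneg a (by omega : b ≠ 0)
  omega

theorem zd_iff (n x : Int) (hn : 1 ≤ n) (hx0 : 0 ≤ x) (hxn : x < n) :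
    (∃ y, (1 ≤ y ∧ y < n) ∧ n ∣ x * y) ↔ 1 < (Int.gcd x n : Int) := by
  constructor
  · rintro ⟨y, ⟨hy1, hy2⟩, hdvd⟩
    by_contra hle
    push_neg at hle
    have hg0 : Int.gcd x n ≠ 0 := by
      intro h0
      have := Int.gcd_eq_zero_iff.mp h0
      omega
    have hg1 : Int.gcd x n = 1 := by omega
    have hcop : IsCoprime n x := by
      rw [Int.isCoprime_iff_gcd_eq_one, Int.gcd_comm]
      exact hg1
    have : n ∣ y := hcop.dvd_of_dvd_mul_left hdvd
    have := Int.le_of_dvd (by omega) this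
    omega
  · intro hg
    obtain ⟨x', hx'⟩ : (Int.gcd x n : Int) ∣ x := Int.gcd_dvd_left x n
    obtain ⟨n', hn'⟩ : (Int.gcd x n : Int) ∣ n := Int.gcd_dvd_right x n
    have hg2 : (2:Int) ≤ (Int.gcd x n : Int) := by exact_mod_cast hg
    have hn'pos : 0 < n' := by nlinarith
    refine ⟨n', ⟨by omega, by nlinarith⟩, ⟨x', by linear_combination n' * hx' - x' * hn'⟩⟩

-- the pointwise bridge: A's inner any equals B's gcd test, for x in range(n), n ≥ 2
theorem pointwise (n x : Int) (hn : 1 ≤ n) (hx0 : 0 ≤ x) (hxn : x < n) :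
    ((PySem.List.pyRange 1 n 1).any (fun y => PySem.Int.mod (x * y) n == 0)) =
      decide (pyGcd x n > 1) := by
  rw [pyGcd_eq_gcd x n hx0 (by omega)]
  rw [Bool.eq_iff_iff]
  simp only [List.any_eq_true, PySem.List.mem_pyRange_one, beq_iff_eq,
    PySem.Int.mod_eq_zero_iff_dvd, decide_eq_true_eq, gt_iff_lt]
  exact zd_iff n x hn hx0 hxn

-- ===== VERDICT (by name: the statement is the Claim_ definition above) =====
theorem get_zero_divisors_spec : Claim_equal_get_zero_divisors := by
  intro n _
  unfold Spec_get_zero_divisors get_zero_divisors get_zero_divisors_alt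
  by_cases h0 : n ≤ 0
  · have e : PySem.List.pyRange 0 n 1 = [] := PySem.List.pyRange_one_eq_nil (by omega)
    rw [e]
    simp [PySem.Set.empty, PySem.Set.ofList]
  · have hnodup := PySem.List.nodup_pyRange_one (a := 0) (b := n)
    rw [foldl_add_filter _ _ _ (by simp [PySem.Set.empty]) hnodup]
    rw [ofList_nodup _ (hnodup.filter _)]
    simp only [PySem.Set.empty, List.nil_append]
    apply List.filter_congr
    intro x hx
    rw [PySem.List.mem_pyRange_one] at hx
    exact pointwise n x (by omega) hx.1 hx.2
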